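-- pv_equiv track=rewrite | github.com/xilcmd/xil-pipeline | src/xil_pipeline/XILU006_splice_parsed.py | delete_entries
-- ===== SOURCE A (Python) =====
-- import copy
--
-- def delete_entries(entries: list[dict], seq_range: tuple[int, int]) -> list[dict]:
--     """Remove entries whose seq falls within [start, end] inclusive, renumber remainder.
--
--     Raises:
--         ValueError: If *seq_range* includes preamble entries (seq <= 0).
--     """
--     start, end = seq_range
--     if start <= 0:
--         raise ValueError(f"Cannot delete preamble entries (seq_range starts at {start})")
--
--     preamble = [copy.deepcopy(e) for e in entries if e["seq"] <= 0]
--     body = [copy.deepcopy(e) for e in entries if e["seq"] > 0 and not (start <= e["seq"] <= end)]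
--
--     for i, e in enumerate(body):
--         e["seq"] = i + 1
--
--     return preamble + body
-- ===== SOURCE B (Python) =====
-- import copy
--
-- def delete_entries(entries: list[dict], seq_range: tuple[int, int]) -> list[dict]:
--     """Reverse-traversal variant: pre-compute the number of surviving body
--     entries, then walk the list back-to-front assigning seq numbers in
--     DESCENDING order (m, m-1, ..., 1), building both output lists reversed
--     and flipping them at the end."""
--     start, end = seq_range
--     if start <= 0:
--         raise ValueError(f"Cannot delete preamble entries (seq_range starts at {start})")
--
--     m = sum(1 for e in entries
--             if e["seq"] > 0 and not (start <= e["seq"] <= end))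
--
--     rpre = []
--     rbody = []
--     k = m
--     for e in reversed(entries):
--         s = e["seq"]
--         if s <= 0:
--             rpre.append(copy.deepcopy(e))
--         elif not (start <= s <= end):
--             c = copy.deepcopy(e)
--             c["seq"] = k
--             k -= 1
--             rbody.append(c)
--     rpre.reverse()
--     rbody.reverse()
--     return rpre + rbody
-- ===== Notes on version B (the rewrite author's own statement) =====
-- stated objective: alternative
-- what changed: A filters forward into two lists and then renumbers the body 1..m in a second forward enumerate pass; B first counts the m survivors, then traverses the entries BACK-TO-FRONT once, assigning seq numbers in descending order m..1 as it meets survivors from the right, building both output lists in reverse and flipping them at the end.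
import Mathlib
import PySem

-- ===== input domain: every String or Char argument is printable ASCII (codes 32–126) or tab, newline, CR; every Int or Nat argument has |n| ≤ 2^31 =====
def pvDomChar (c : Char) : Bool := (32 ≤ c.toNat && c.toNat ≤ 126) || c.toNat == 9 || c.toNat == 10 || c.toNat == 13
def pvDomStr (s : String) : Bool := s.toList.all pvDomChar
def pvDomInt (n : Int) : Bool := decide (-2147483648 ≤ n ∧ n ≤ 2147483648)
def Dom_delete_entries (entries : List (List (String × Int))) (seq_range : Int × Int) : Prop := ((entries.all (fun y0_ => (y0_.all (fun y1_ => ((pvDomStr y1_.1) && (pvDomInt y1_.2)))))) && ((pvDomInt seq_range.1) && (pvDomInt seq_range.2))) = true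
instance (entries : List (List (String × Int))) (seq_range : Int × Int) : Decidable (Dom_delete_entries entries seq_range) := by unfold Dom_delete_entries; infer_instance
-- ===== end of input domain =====

-- B pre-counts the survivors and then traverses the entries back-to-front once, numbering
-- survivors in descending order; equivalence of the RETURN values is proved on Pre_.

-- ===== PORT A =====
-- e["seq"] lookup (Pre_ guarantees the key is present, so the default is never used)
def pvSeq (e : List (String × Int)) : Int := (PySem.Dict.mk e).getD "seq" 0

-- e["seq"] = v : in-place overwrite of the existing key (Python dict assignment)
def pvSetSeq (e : List (String × Int)) (v : Int) : List (String × Int) :=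
  ((PySem.Dict.mk e).insert "seq" v).items

def delete_entries (entries : List (List (String × Int))) (seq_range : Int × Int) : List (List (String × Int)) :=
  let start := seq_range.1
  let stop := seq_range.2
  let preamble := entries.filter (fun e => decide (pvSeq e ≤ 0))
  let body := entries.filter (fun e => decide (0 < pvSeq e) && !(decide (start ≤ pvSeq e) && decide (pvSeq e ≤ stop)))
  let body2 := (PySem.List.enumerate body 0).map (fun p => pvSetSeq p.2 (p.1 + 1))
  preamble ++ body2

-- ===== PORT B =====
-- one step of B's reversed loop over state (rpre, rbody, k); k counts DOWN
def pvAltStep (start stop : Int)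
    (st : List (List (String × Int)) × List (List (String × Int)) × Int)
    (e : List (String × Int)) :
    List (List (String × Int)) × List (List (String × Int)) × Int :=
  let s := pvSeq e
  if s ≤ 0 then (st.1 ++ [e], st.2.1, st.2.2)
  else if start ≤ s ∧ s ≤ stop then st
  else (st.1, st.2.1 ++ [pvSetSeq e st.2.2], st.2.2 - 1)

def delete_entries_alt (entries : List (List (String × Int))) (seq_range : Int × Int) : List (List (String × Int)) :=
  let start := seq_range.1
  let stop := seq_range.2
  let m : Int := entries.countP (fun e => decide (0 < pvSeq e) && !(decide (start ≤ pvSeq e) && decide (pvSeq e ≤ stop)))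
  let st := entries.reverse.foldl (pvAltStep start stop) ([], [], m)
  st.1.reverse ++ st.2.1.reverse

-- ===== PRECONDITION & SPEC =====
-- A raises ValueError when seq_range.1 ≤ 0 and KeyError when some entry lacks a "seq" key;
-- Pre_ excludes exactly those inputs.
def Pre_delete_entries (entries : List (List (String × Int))) (seq_range : Int × Int) : Prop :=
  0 < seq_range.1 ∧ ∀ e ∈ entries, (PySem.Dict.mk e).contains "seq" = true
instance (entries : List (List (String × Int))) (seq_range : Int × Int) : Decidable (Pre_delete_entries entries seq_range) := by unfold Pre_delete_entries; infer_instance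

def pvWitness_delete_entries : (List (List (String × Int))) × (Int × Int) :=
  ([[("seq", 0)], [("seq", 1), ("v", 7)], [("seq", 2)], [("seq", 3)]], (2, 2))

def Spec_delete_entries (entries : List (List (String × Int))) (seq_range : Int × Int) (out : List (List (String × Int))) : Prop := out = delete_entries_alt entries seq_range
instance (entries : List (List (String × Int))) (seq_range : Int × Int) (out : List (List (String × Int))) : Decidable (Spec_delete_entries entries seq_range out) := by unfold Spec_delete_entries; infer_instance

-- ===== CLAIM (what is proved, stated in full; the proofs are below) =====
def Claim_equal_delete_entries : Prop := ∀ (entries : List (List (String × Int))) (seq_range : Int × Int), Dom_delete_entries entries seq_range → Pre_delete_entries entries seq_range → Spec_delete_entries entries seq_range (delete_entries entries seq_range)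

-- ===== LEMMAS AND PROOFS =====

-- shifting the start of an enumeration into the mapped function
theorem pvEnum_map_shift {α β : Type} (l : List α) (n c : Int) (g : Int → α → β) :
    (PySem.List.enumerate l n).map (fun q => g (q.1 + c) q.2)
      = (PySem.List.enumerate l (n + c)).map (fun q => g q.1 q.2) := by
  induction l generalizing n with
  | nil => rfl
  | cons x xs ih =>
      simp only [PySem.List.enumerate_cons, List.map_cons]
      rw [ih]
      have h : n + 1 + c = n + c + 1 := by ring
      rw [h]

-- numbering k-1, k-2, … from index 0 equals numbering k - i from index 1
theorem pvEnum_map_pred (l : List (List (String × Int))) (n k : Int) :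
    (PySem.List.enumerate l n).map (fun q => pvSetSeq q.2 (k - 1 - q.1))
      = (PySem.List.enumerate l (n + 1)).map (fun q => pvSetSeq q.2 (k - q.1)) := by
  induction l generalizing n with
  | nil => rfl
  | cons x xs ih =>
      simp only [PySem.List.enumerate_cons, List.map_cons]
      rw [ih]
      have h : k - 1 - n = k - (n + 1) := by ring
      rw [h]

theorem pvEnum_map_pred_zero (l : List (List (String × Int))) (k : Int) :
    (PySem.List.enumerate l 0).map (fun q => pvSetSeq q.2 (k - 1 - q.1))
      = (PySem.List.enumerate l 1).map (fun q => pvSetSeq q.2 (k - q.1)) := by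
  have h := pvEnum_map_pred l 0 k
  simp only [zero_add] at h
  exact h

-- B's reversed fold, characterised: preamble filtered, survivors numbered k, k-1, …
theorem pvFold_spec (start stop : Int) (es : List (List (String × Int)))
    (p b : List (List (String × Int))) (k : Int) :
    es.foldl (pvAltStep start stop) (p, b, k)
      = (p ++ (es.filter (fun e => decide (pvSeq e ≤ 0))),
         b ++ (PySem.List.enumerate
             (es.filter (fun e => decide (0 < pvSeq e) && !(decide (start ≤ pvSeq e) && decide (pvSeq e ≤ stop)))) 0).map
             (fun q => pvSetSeq q.2 (k - q.1)),
         k - (es.filter (fun e => decide (0 < pvSeq e) && !(decide (start ≤ pvSeq e) && decide (pvSeq e ≤ stop)))).length) := by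
  induction es generalizing p b k with
  | nil => simp
  | cons e es ih =>
      simp only [List.foldl_cons]
      by_cases h0 : pvSeq e ≤ 0
      · have hstep : pvAltStep start stop (p, b, k) e = (p ++ [e], b, k) := by
          simp [pvAltStep, h0]
        have hP : (decide (pvSeq e ≤ 0)) = true := by simpa using h0
        rw [hstep, ih]
        have hc : ¬(0 < pvSeq e ∧ (pvSeq e < start ∨ stop < pvSeq e)) := by omega
        simp [hP, hc]
      · have hP : (decide (pvSeq e ≤ 0)) = false := by simpa using h0
        by_cases hr : start ≤ pvSeq e ∧ pvSeq e ≤ stop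
        · have hstep : pvAltStep start stop (p, b, k) e = (p, b, k) := by
            simp [pvAltStep, h0, hr]
          rw [hstep, ih]
          have hc : ¬(0 < pvSeq e ∧ (pvSeq e < start ∨ stop < pvSeq e)) := by omega
          simp [hP, hc]
        · have hstep : pvAltStep start stop (p, b, k) e = (p, b ++ [pvSetSeq e k], k - 1) := by
            simp [pvAltStep, h0, hr]
          rw [hstep, ih]
          have hc : 0 < pvSeq e ∧ (pvSeq e < start ∨ stop < pvSeq e) := by omega
          simp only [List.filter_cons, hP, hc, Bool.false_eq_true, if_false,
            PySem.List.enumerate_cons, List.map_cons, List.append_assoc,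
            List.cons_append, List.nil_append, Prod.mk.injEq, List.length_cons]
          refine ⟨by simp [hc], ?_, by simp [hc]; push_cast; ring⟩
          rw [pvEnum_map_pred_zero]
          simp [hc]

-- reversing a descending-numbered enumeration of the reversed list gives an ascending one
theorem pvEnum_rev (l : List (List (String × Int))) (n k : Int) :
    ((PySem.List.enumerate l.reverse n).map (fun q => pvSetSeq q.2 (k - q.1))).reverse
      = (PySem.List.enumerate l (k - n - l.length + 1)).map (fun q => pvSetSeq q.2 q.1) := by
  induction l generalizing n with
  | nil => rfl
  | cons x xs ih =>
      have happ : (x :: xs).reverse = xs.reverse ++ [x] := by simp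
      rw [happ, PySem.List.enumerate_append]
      simp only [List.map_append, List.reverse_append, PySem.List.enumerate_cons,
        PySem.List.enumerate_nil, List.map_cons, List.map_nil, List.reverse_cons,
        List.reverse_nil, List.nil_append, List.cons_append, List.length_reverse,
        List.length_cons]
      rw [ih]
      push_cast
      have h1 : k - (n + (xs.length : Int)) = k - n - ((xs.length : Int) + 1) + 1 := by ring
      have h2 : k - n - (xs.length : Int) + 1 = k - n - ((xs.length : Int) + 1) + 1 + 1 := by ring
      rw [h1, h2]

-- ===== VERDICT (by name: the statement is the Claim_ definition above) =====
theorem delete_entries_spec : Claim_equal_delete_entries := by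
  intro entries sr _ _
  simp only [Spec_delete_entries, delete_entries, delete_entries_alt]
  rw [pvFold_spec]
  simp only [List.nil_append, List.filter_reverse, List.reverse_reverse]
  rw [pvEnum_rev]
  have hshift := pvEnum_map_shift
      (entries.filter (fun e => decide (0 < pvSeq e) && !(decide (sr.1 ≤ pvSeq e) && decide (pvSeq e ≤ sr.2))))
      0 1 (fun i x => pvSetSeq x i)
  simp only [zero_add] at hshift
  rw [hshift]
  congr 2
  rw [List.countP_eq_length_filter]
  push_cast
  ring
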